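/-
  THE HEAP (c/heap/heap.c): ghost state, invariant, transitions. Program-independent.

  The heap is a bump allocator over the region `[base, limit)` that the start state leaves wholly poisoned and zero:

        base                 base + 32 = first                                   first + used = top          limit
        | control cell: used |  chunk of the oldest object | … | chunk of the newest |   never touched: 0, FFH   |

        one chunk, for the object `(p, n)` of capacity `c`:
                        p - 32        p - 24     p - 16       p - 8    p          p + n                 p + c            p + c + 32
                        | size = n    | state    | cap = c    | unused | n bytes  | room to grow in place | right red zone |
  Every object ever allocated stays in the list for ever, LIVE or FREED: a chunk is never re-used. Only `[p, p + n)` of a LIVE object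
  is accessible; headers, the room up to the capacity, red zones, freed objects and the untouched rest are poisoned. `malloc` gives
  `c = r16 n`; a `realloc` that moves the object gives `2 * r16 n`; a `realloc` to a size with `r16 m ≤ c` works IN PLACE.

      r16 n                      n rounded up to a multiple of 16 (the alignment of the pointers `malloc` returns)
      HState, HObj, Heap         the ghost state: `base limit used` and the objects, NEWEST FIRST, each with exact size, capacity, state
      Chain first objs top       the chunks tile `[first, top)` in allocation order, without gaps
      H.Fits c                   the success condition of an allocation of capacity `c`: `top + 64 + c ≤ limit`
      H.push n c, H.release p, H.resize p m
                                 the three transitions: a new live object at `H.next`; the object at `p` becomes freed; the object at `p`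
                                 gets the size `m` (in place)
      H.Live p n, H.LiveCap p n c, H.Freed p n
                                 the views a client states its invariants with; `H.liveObjs`: the live objects as `Asan.Obj`s (kind `.heap`)

      HeapOK H mem               THE DATA SIDE: geometry (16-aligned, in the data space above every image, off the stack), the chain,
                                 the control cell holds `used`, every header holds its object's size, state and capacity
      HeapPoisoned H mem         THE TIGHTNESS CLAUSE: every granule of `[base, limit)` that no live object owns is poisoned
      HeapInv H rest frames top mem
                                 both, and the shadow layer `ShadowInv (H.liveObjs ++ rest) frames top mem` with the live heap objects
                                 IN FRONT of the other live objects `rest` (globals, input, output), all of which lie outside `[base, limit)`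

  WHAT A CLIENT GETS (§6, §7, §8):
      HeapOK.obj_range / obj_aligned / obj_inside / obj_offStack       where an object is: inside the heap, 16-aligned, in the data space, off the stack
      HeapOK.apart                two objects with different bases are at least 64 bytes apart (two red zones between them)
      HeapOK.base_inj             an address is the base of at most one object, so `Live p n` determines `n`, and LIVE excludes FREED
      HeapOK.next_above           NEVER RE-USE: the next object lies above every object there is, live OR freed (no ABA: an address is the
                                  base of at most one object over the whole run)
      HeapOK.frame / writeLE_obj / writeLE_out / sameExcept      a store inside an object's bytes, or outside `[base, top)`, keeps `HeapOK`
      Heap.Live.push, Heap.Live.release_ne, Heap.Live.resize_ne, Heap.Freed.push, Heap.Freed.release, Heap.Freed.resize,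
      Heap.live_push, Heap.freed_release, Heap.live_resize
                                  HOW THE VIEWS CHANGE: `malloc` keeps every object and adds one; `free p` changes the state of `p` only;
                                  an in-place `realloc` changes the size of `p` only
      (the same for `LiveIn` over the live LIST — `LiveIn.heap_push`, `LiveIn.heap_release`, `LiveIn.heap_resize`, `Heap.Live.liveIn` —
       is in ProgX/Spec/Heap.lean, next to the contracts: `LiveIn` is the contract layer's, ProgX/Spec/Basic.lean)
      HeapInv.malloc, HeapInv.free, HeapInv.resize, HeapInv.frame, HeapInv.writeLE_live, HeapInv.lower
                                  THE TRANSITIONS of the whole invariant, in the form a machine proof delivers the final memory: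
                                  `unpoisonMem mem₂ p n` / `poisonMem mem₂ p n` (Asan/Objects.lean) over the memory `mem₂` after the
                                  allocator's own stores
      HeapInv.empty               the start: the empty heap on a zero, wholly poisoned region
      (`ShadowInv.subset`, which this file uses, is in Asan/Stack.lean)

  Numbers: the red zones are 32 bytes on each side (written 32 and 64 below, as `omega` wants literals), the alignment is 16.
-/
import Asan.Stack
import Asan.Check
namespace Asan
open X86 X86.User

/-! ### 1. Rounding to a multiple of 16 -/

/-- `r16 n = (n + 15) & ~15`: the room an object of `n` bytes takes in its chunk. -/
def r16 (n : Nat) : Nat := (n + 15) / 16 * 16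

/-- The form `omega` works with. -/
theorem r16_def (n : Nat) : r16 n = (n + 15) / 16 * 16 := id rfl

/-- A rounded size is a multiple of 16. -/
theorem r16_mod (n : Nat) : r16 n % 16 = 0 := by
  rw [r16_def]
  omega

/-- Rounding does not shrink. -/
theorem le_r16 (n : Nat) : n ≤ r16 n := by
  rw [r16_def]
  omega

/-- Rounding adds less than 16. -/
theorem r16_lt (n : Nat) : r16 n < n + 16 := by
  rw [r16_def]
  omega

/-- Rounding is monotone. -/
theorem r16_mono {n m : Nat} (h : n ≤ m) : r16 n ≤ r16 m := by
  rw [r16_def, r16_def]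
  omega

/-- The mask `~15` on a 64-bit number clears the four low bits. -/
theorem land_mask16 (x : Nat) (hx : x < 2 ^ 64) : x &&& 0xFFFFFFFFFFFFFFF0 = x / 16 * 16 := by
  have hbits : ∀ i, i < 64 → Nat.testBit 0xFFFFFFFFFFFFFFF0 i = decide (4 ≤ i) := by decide
  apply Nat.eq_of_testBit_eq
  intro i
  have e : x / 16 * 16 = (x >>> 4) <<< 4 := by
    rw [Nat.shiftRight_eq_div_pow, Nat.shiftLeft_eq]
  rw [e, Nat.testBit_and, Nat.testBit_shiftLeft, Nat.testBit_shiftRight]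
  by_cases hi : i < 64
  · rw [hbits i hi]
    by_cases h4 : 4 ≤ i
    · have e2 : 4 + (i - 4) = i := by omega
      simp only [h4, decide_true, Bool.and_true, Bool.true_and, e2]
    · simp only [h4, decide_false, Bool.and_false, Bool.false_and]
  · have hlt : x < 2 ^ i := Nat.lt_of_lt_of_le hx (Nat.pow_le_pow_right (by decide) (by omega))
    have h4 : 4 ≤ i := by omega
    have e2 : 4 + (i - 4) = i := by omega
    rw [Nat.testBit_lt_two_pow hlt]
    simp only [Bool.false_and, h4, decide_true, e2, Bool.true_and]
    exact (Nat.testBit_lt_two_pow hlt).symm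

/-- **The machine's rounding** `lea r, [n + 15] ; and r, -16` is `r16`, for a size whose sum does not wrap. -/
theorem r16_land (n : Nat) (h : n + 15 < 2 ^ 64) : (n + 15) &&& 0xFFFFFFFFFFFFFFF0 = r16 n := by
  rw [land_mask16 _ h, r16_def]

/-! ### 2. The ghost state -/

/-- The state of a heap object. -/
inductive HState where
  | live
  | freed
  deriving DecidableEq, Repr

/-- The word the header holds for a state: `"LIVE"` / `"REED"` as little-endian ASCII (HEAP_LIVE, HEAP_FREED of heap.c). -/
def HState.magic : HState → Nat
  | .live => 0x4556494C
  | .freed => 0x44454552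

/-- **A heap object**: the `size` bytes at `base` (the pointer `malloc` returned), the capacity `cap` of its chunk (it may grow in
place up to `cap` bytes), and whether it has been freed. -/
structure HObj where
  base : Nat
  size : Nat
  cap : Nat
  state : HState
  deriving DecidableEq, Repr

/-- The object as the shadow layer sees it. -/
def HObj.obj (o : HObj) : Obj := ⟨o.base, o.size, .heap⟩

@[simp] theorem HObj.obj_base (o : HObj) : o.obj.base = o.base := id rfl
@[simp] theorem HObj.obj_size (o : HObj) : o.obj.size = o.size := id rfl

/-- **The heap, as ghost state**: the region `[base, limit)`, the bytes used by chunks so far, and every object ever allocated,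
newest first. -/
structure Heap where
  base : Nat
  limit : Nat
  used : Nat
  objs : List HObj

namespace Heap

/-- Where the first chunk starts: behind the control cell's 32 bytes. -/
def first (H : Heap) : Nat := H.base + 32

/-- Where the next chunk will start: the bump pointer. -/
def top (H : Heap) : Nat := H.base + 32 + H.used

/-- The pointer the next successful `malloc` returns. -/
def next (H : Heap) : Nat := H.base + 32 + H.used + 32

/-- **The success condition of an allocation of capacity `c`**: the chunk `32 + c + 32` fits below `limit`. -/
def Fits (H : Heap) (c : Nat) : Prop := H.base + 32 + H.used + 64 + c ≤ H.limit

instance (H : Heap) (c : Nat) : Decidable (H.Fits c) := by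
  unfold Fits
  infer_instance

/-- **After a successful allocation** of `n` bytes with capacity `c`: one more live object, at `H.next`. -/
def push (H : Heap) (n c : Nat) : Heap :=
  { H with used := H.used + 64 + c, objs := ⟨H.next, n, c, .live⟩ :: H.objs }

/-- An object after `free(p)`: freed if it is the one at `p`. -/
def releaseObj (p : Nat) (o : HObj) : HObj := if o.base = p then { o with state := .freed } else o

/-- **After `free(p)`**: the object at `p` is freed; nothing is removed, nothing moves. -/
def release (H : Heap) (p : Nat) : Heap := { H with objs := H.objs.map (releaseObj p) }

/-- An object after an in-place `realloc(p, m)`: the one at `p` has the size `m`. -/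
def resizeObj (p m : Nat) (o : HObj) : HObj := if o.base = p then { o with size := m } else o

/-- **After an in-place `realloc(p, m)`**: the object at `p` has the size `m`; its chunk, its capacity, its address stay. -/
def resize (H : Heap) (p m : Nat) : Heap := { H with objs := H.objs.map (resizeObj p m) }

/-- `[p, p + n)` is a LIVE object of the heap, of capacity `c`. -/
def LiveCap (H : Heap) (p n c : Nat) : Prop := (⟨p, n, c, .live⟩ : HObj) ∈ H.objs

/-- `[p, p + n)` is a LIVE object of the heap. -/
def Live (H : Heap) (p n : Nat) : Prop := ∃ c, H.LiveCap p n c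

/-- `[p, p + n)` is a FREED object of the heap. -/
def Freed (H : Heap) (p n : Nat) : Prop := ∃ c, (⟨p, n, c, .freed⟩ : HObj) ∈ H.objs

/-- **The live objects, as objects of the shadow layer** (newest first). -/
def liveObjs (H : Heap) : List Obj := (H.objs.filter (fun o => decide (o.state = .live))).map HObj.obj

/-- The heap before the first `malloc`. -/
def empty (base limit : Nat) : Heap := ⟨base, limit, 0, []⟩

@[simp] theorem push_base (H : Heap) (n c : Nat) : (H.push n c).base = H.base := id rfl
@[simp] theorem push_limit (H : Heap) (n c : Nat) : (H.push n c).limit = H.limit := id rfl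
@[simp] theorem push_used (H : Heap) (n c : Nat) : (H.push n c).used = H.used + 64 + c := id rfl
@[simp] theorem push_objs (H : Heap) (n c : Nat) : (H.push n c).objs = ⟨H.next, n, c, .live⟩ :: H.objs := id rfl
@[simp] theorem release_base (H : Heap) (p : Nat) : (H.release p).base = H.base := id rfl
@[simp] theorem release_limit (H : Heap) (p : Nat) : (H.release p).limit = H.limit := id rfl
@[simp] theorem release_used (H : Heap) (p : Nat) : (H.release p).used = H.used := id rfl
@[simp] theorem release_objs (H : Heap) (p : Nat) : (H.release p).objs = H.objs.map (releaseObj p) := id rfl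
@[simp] theorem resize_base (H : Heap) (p m : Nat) : (H.resize p m).base = H.base := id rfl
@[simp] theorem resize_limit (H : Heap) (p m : Nat) : (H.resize p m).limit = H.limit := id rfl
@[simp] theorem resize_used (H : Heap) (p m : Nat) : (H.resize p m).used = H.used := id rfl
@[simp] theorem resize_objs (H : Heap) (p m : Nat) : (H.resize p m).objs = H.objs.map (resizeObj p m) := id rfl

theorem next_def (H : Heap) : H.next = H.base + 32 + H.used + 32 := id rfl
theorem top_def (H : Heap) : H.top = H.base + 32 + H.used := id rfl

theorem LiveCap.live {H : Heap} {p n c : Nat} (h : H.LiveCap p n c) : H.Live p n := ⟨c, h⟩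

end Heap

theorem releaseObj_base (p : Nat) (o : HObj) : (Heap.releaseObj p o).base = o.base := by
  unfold Heap.releaseObj
  split <;> rfl

theorem releaseObj_size (p : Nat) (o : HObj) : (Heap.releaseObj p o).size = o.size := by
  unfold Heap.releaseObj
  split <;> rfl

theorem releaseObj_cap (p : Nat) (o : HObj) : (Heap.releaseObj p o).cap = o.cap := by
  unfold Heap.releaseObj
  split <;> rfl

theorem resizeObj_base (p m : Nat) (o : HObj) : (Heap.resizeObj p m o).base = o.base := by
  unfold Heap.resizeObj
  split <;> rfl

theorem resizeObj_cap (p m : Nat) (o : HObj) : (Heap.resizeObj p m o).cap = o.cap := by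
  unfold Heap.resizeObj
  split <;> rfl

theorem resizeObj_state (p m : Nat) (o : HObj) : (Heap.resizeObj p m o).state = o.state := by
  unfold Heap.resizeObj
  split <;> rfl

theorem resizeObj_of_ne {p m : Nat} {o : HObj} (h : o.base ≠ p) : Heap.resizeObj p m o = o := by
  unfold Heap.resizeObj
  rw [if_neg h]

theorem resizeObj_of_eq {p m : Nat} {o : HObj} (h : o.base = p) : Heap.resizeObj p m o = ⟨o.base, m, o.cap, o.state⟩ := by
  unfold Heap.resizeObj
  rw [if_pos h]

theorem releaseObj_of_ne {p : Nat} {o : HObj} (h : o.base ≠ p) : Heap.releaseObj p o = o := by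
  unfold Heap.releaseObj
  rw [if_neg h]

theorem releaseObj_of_eq {p : Nat} {o : HObj} (h : o.base = p) : Heap.releaseObj p o = ⟨o.base, o.size, o.cap, .freed⟩ := by
  unfold Heap.releaseObj
  rw [if_pos h]

/-! ### 3. The chain of chunks -/

/-- **The chunks of `objs` (newest first) tile `[first, top)`**: the oldest chunk starts at `first`, each next one where the
previous ended, the newest ends at `top`. The chunk of an object at `p` of capacity `c` is `[p - 32, p + c + 32)`. -/
def Chain (first : Nat) : List HObj → Nat → Prop
  | [], top => top = first
  | o :: rest, top => ∃ c, Chain first rest c ∧ o.base = c + 32 ∧ top = o.base + o.cap + 32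

namespace Chain
variable {first top : Nat} {objs : List HObj}

/-- The chain does not end before it starts. -/
theorem le (h : Chain first objs top) : first ≤ top := by
  induction objs generalizing top with
  | nil =>
    unfold Chain at h
    omega
  | cons o rest ih =>
    unfold Chain at h
    obtain ⟨c, hc, hb, ht⟩ := h
    have := ih hc
    omega

/-- Every chunk lies inside `[first, top)`. -/
theorem mem_range (h : Chain first objs top) {o : HObj} (ho : o ∈ objs) :
    first + 32 ≤ o.base ∧ o.base + o.cap + 32 ≤ top := by
  induction objs generalizing top with
  | nil => exact absurd ho List.not_mem_nil
  | cons o' rest ih =>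
    unfold Chain at h
    obtain ⟨c, hc, hb, ht⟩ := h
    have hle := hc.le
    rcases List.mem_cons.mp ho with rfl | hin
    · omega
    · have := ih hc hin
      omega

/-- With a 16-aligned start and capacities that are multiples of 16, every base, and the end, is 16-aligned. -/
theorem aligned (h : Chain first objs top) (hf : first % 16 = 0) (hcap : ∀ o, o ∈ objs → o.cap % 16 = 0) :
    top % 16 = 0 ∧ ∀ o, o ∈ objs → o.base % 16 = 0 := by
  induction objs generalizing top with
  | nil =>
    unfold Chain at h
    refine ⟨by omega, ?_⟩
    intro o ho
    exact absurd ho List.not_mem_nil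
  | cons o' rest ih =>
    unfold Chain at h
    obtain ⟨c, hc, hb, ht⟩ := h
    obtain ⟨hc16, hrest⟩ := ih hc (fun o ho => hcap o (List.mem_cons_of_mem _ ho))
    have hr := hcap o' List.mem_cons_self
    refine ⟨by omega, ?_⟩
    intro o ho
    rcases List.mem_cons.mp ho with rfl | hin
    · omega
    · exact hrest o hin

/-- **A newer chunk lies above every older one**, with both red zones between the two objects. -/
theorem pairwise (h : Chain first objs top) :
    objs.Pairwise (fun o o' => o'.base + o'.cap + 64 ≤ o.base) := by
  induction objs generalizing top with
  | nil => exact List.Pairwise.nil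
  | cons o rest ih =>
    unfold Chain at h
    obtain ⟨c, hc, hb, ht⟩ := h
    refine List.pairwise_cons.mpr ⟨?_, ih hc⟩
    intro o' ho'
    have := hc.mem_range ho'
    omega

/-- The chain looks at bases and capacities only: a map that keeps both keeps the chain (freeing, resizing in place). -/
theorem map (h : Chain first objs top) (f : HObj → HObj) (hb : ∀ o, (f o).base = o.base) (hc : ∀ o, (f o).cap = o.cap) :
    Chain first (objs.map f) top := by
  induction objs generalizing top with
  | nil => exact h
  | cons o rest ih =>
    unfold Chain at h
    obtain ⟨c, hch, hbase, ht⟩ := h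
    simp only [List.map_cons]
    unfold Chain
    refine ⟨c, ih hch, ?_, ?_⟩
    · rw [hb]
      exact hbase
    · rw [hb, hc]
      exact ht

end Chain

/-! ### 4. The data side of the invariant -/

/-- **THE HEAP IN MEMORY** (no shadow byte is mentioned: see `HeapPoisoned`, `HeapInv`). -/
structure HeapOK (H : Heap) (mem : Mem) : Prop where
  /-- the region starts on a 16-byte boundary … -/
  base16 : H.base % 16 = 0
  /-- … above every image and the parameter block (link scripts end the image below 1F0000H) … -/
  lo : 0x200000 ≤ H.base
  /-- … ends in the data space … -/
  hi : H.limit ≤ 0xC00000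
  /-- … and does not meet the stack -/
  offStack : H.limit ≤ 0x700000 ∨ 0x800000 ≤ H.base
  /-- the chunks so far lie inside the region -/
  room : H.base + 32 + H.used ≤ H.limit
  /-- the chunks tile `[base + 32, base + 32 + used)` -/
  chain : Chain (H.base + 32) H.objs (H.base + 32 + H.used)
  /-- an object fits its capacity, which is a multiple of 16 -/
  capOK : ∀ o, o ∈ H.objs → r16 o.size ≤ o.cap ∧ o.cap % 16 = 0
  /-- the control cell -/
  cell : mem.readLE (UInt64.ofNat H.base) 8 = H.used
  /-- the headers: size at `p - 32`, state at `p - 24`, capacity at `p - 16` -/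
  hdr : ∀ o, o ∈ H.objs →
    mem.readLE (UInt64.ofNat (o.base - 32)) 8 = o.size ∧ mem.readLE (UInt64.ofNat (o.base - 24)) 8 = o.state.magic ∧
    mem.readLE (UInt64.ofNat (o.base - 16)) 8 = o.cap

namespace HeapOK
variable {H : Heap} {mem mem' : Mem}

/-- **Where an object is**: its chunk lies between the control cell and the bump pointer. -/
theorem obj_range (h : HeapOK H mem) {o : HObj} (ho : o ∈ H.objs) :
    H.base + 64 ≤ o.base ∧ o.base + o.cap + 32 ≤ H.base + 32 + H.used := by
  have := h.chain.mem_range ho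
  omega

/-- An object's size is at most its capacity. -/
theorem size_le_cap (h : HeapOK H mem) {o : HObj} (ho : o ∈ H.objs) : o.size ≤ o.cap := by
  have h1 := (h.capOK o ho).1
  have h2 := le_r16 o.size
  omega

/-- An object's base is a multiple of 16. -/
theorem obj_aligned (h : HeapOK H mem) {o : HObj} (ho : o ∈ H.objs) : o.base % 16 = 0 := by
  have hb := h.base16
  exact (h.chain.aligned (by omega) (fun o ho => (h.capOK o ho).2)).2 o ho

/-- The bump pointer is a multiple of 16. -/
theorem used_aligned (h : HeapOK H mem) : H.used % 16 = 0 := by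
  have hb := h.base16
  have := (h.chain.aligned (first := H.base + 32) (by omega) (fun o ho => (h.capOK o ho).2)).1
  omega

/-- **An object lies in the data space, above every image, with room to spare below `limit`.** -/
theorem obj_inside (h : HeapOK H mem) {o : HObj} (ho : o ∈ H.objs) :
    0x200040 ≤ o.base ∧ o.base + o.cap + 32 ≤ H.limit ∧ o.base + o.size + 32 ≤ 0xC00000 ∧ o.base + o.cap + 32 ≤ 0xC00000 := by
  have h1 := h.obj_range ho
  have h2 := h.lo
  have h3 := h.hi
  have h4 := h.room
  have h5 := h.size_le_cap ho
  omega

/-- **An object is off the stack.** -/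
theorem obj_offStack (h : HeapOK H mem) {o : HObj} (ho : o ∈ H.objs) : OffStack o.obj := by
  have h1 := h.obj_range ho
  have h4 := h.room
  have h5 := h.size_le_cap ho
  have h6 := h.offStack
  unfold OffStack
  simp only [HObj.obj_base, HObj.obj_size]
  omega

/-- **Two objects are the same or far apart**: at least 64 bytes (the right red zone of the lower, the left red zone of the
upper) between the end of the capacity of one and the start of the other. -/
theorem apart (h : HeapOK H mem) {o o' : HObj} (ho : o ∈ H.objs) (ho' : o' ∈ H.objs) (hne : o ≠ o') :
    o.base + o.cap + 64 ≤ o'.base ∨ o'.base + o'.cap + 64 ≤ o.base := by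
  have hp := h.chain.pairwise
  have key : ∀ (l : List HObj), l.Pairwise (fun a b => b.base + b.cap + 64 ≤ a.base) → o ∈ l → o' ∈ l →
      o.base + o.cap + 64 ≤ o'.base ∨ o'.base + o'.cap + 64 ≤ o.base := by
    intro l hl
    induction l with
    | nil =>
      intro hin
      exact absurd hin List.not_mem_nil
    | cons x rest ih =>
      intro hin hin'
      obtain ⟨hx, hrest⟩ := List.pairwise_cons.mp hl
      rcases List.mem_cons.mp hin with e | hr
      · rcases List.mem_cons.mp hin' with e' | hr'
        · exact absurd (e.trans e'.symm) hne
        · subst e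
          exact Or.inr (hx o' hr')
      · rcases List.mem_cons.mp hin' with e' | hr'
        · subst e'
          exact Or.inl (hx o hr)
        · exact ih hrest hr hr'
  exact key H.objs hp ho ho'

/-- **An address is the base of at most one object.** -/
theorem base_inj (h : HeapOK H mem) {o o' : HObj} (ho : o ∈ H.objs) (ho' : o' ∈ H.objs) (hb : o.base = o'.base) : o = o' := by
  apply Classical.byContradiction
  intro hne
  have := h.apart ho ho' hne
  omega

/-- A live object's size and capacity are determined by its base. -/
theorem liveCap_inj (h : HeapOK H mem) {p n n' c c' : Nat} (h1 : H.LiveCap p n c) (h2 : H.LiveCap p n' c') : n = n' ∧ c = c' := by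
  have := h.base_inj h1 h2 rfl
  exact ⟨congrArg HObj.size this, congrArg HObj.cap this⟩

/-- A live object's size is determined by its base. -/
theorem live_size (h : HeapOK H mem) {p n n' : Nat} (h1 : H.Live p n) (h2 : H.Live p n') : n = n' := by
  obtain ⟨c, h1⟩ := h1
  obtain ⟨c', h2⟩ := h2
  exact (h.liveCap_inj h1 h2).1

/-- **Live excludes freed.** -/
theorem live_not_freed (h : HeapOK H mem) {p n n' : Nat} (h1 : H.Live p n) (h2 : H.Freed p n') : False := by
  obtain ⟨c, h1⟩ := h1
  obtain ⟨c', h2⟩ := h2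
  have := h.base_inj h1 h2 rfl
  have e : HState.live = HState.freed := congrArg HObj.state this
  exact HState.noConfusion e

/-- **Two objects with different bases do not share a byte, a granule, or a red zone.** -/
theorem apart_of_base_ne (h : HeapOK H mem) {o o' : HObj} (ho : o ∈ H.objs) (ho' : o' ∈ H.objs) (hne : o.base ≠ o'.base) :
    o.base + o.cap + 64 ≤ o'.base ∨ o'.base + o'.cap + 64 ≤ o.base := by
  apply h.apart ho ho'
  intro e
  exact hne (congrArg HObj.base e)

/-- **NEVER RE-USE**: the object the next allocation returns lies above every object there is — live OR freed — with two red
zones between. So an address is the base of at most one object over the whole run, and a fresh object shares no byte with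
anything a stale pointer may point to. -/
theorem next_above (h : HeapOK H mem) {o : HObj} (ho : o ∈ H.objs) : o.base + o.cap + 64 ≤ H.next := by
  have := h.obj_range ho
  rw [Heap.next_def]
  omega

/-- **THE FRAME LEMMA of the data side**: a memory that agrees with `mem` on the control cell and on every header keeps the heap. -/
theorem frame (h : HeapOK H mem) (hcell : Mem.EqOn H.base (H.base + 8) mem mem')
    (hhdr : ∀ o, o ∈ H.objs → Mem.EqOn (o.base - 32) (o.base - 8) mem mem') : HeapOK H mem' := by
  have hlo := h.lo
  have hhi := h.hi
  have hroom := h.room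
  have hb : (UInt64.ofNat H.base).toNat = H.base := toNat_ofNat_lt' H.base (by omega)
  refine ⟨h.base16, h.lo, h.hi, h.offStack, h.room, h.chain, h.capOK, ?_, ?_⟩
  · rw [hcell.readLE (UInt64.ofNat H.base) 8 (by omega) (by omega) (by omega)]
    exact h.cell
  · intro o ho
    have hr := h.obj_range ho
    have hi := h.obj_inside ho
    have e1 : (UInt64.ofNat (o.base - 32)).toNat = o.base - 32 := toNat_ofNat_lt' _ (by omega)
    have e2 : (UInt64.ofNat (o.base - 24)).toNat = o.base - 24 := toNat_ofNat_lt' _ (by omega)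
    have e3 : (UInt64.ofNat (o.base - 16)).toNat = o.base - 16 := toNat_ofNat_lt' _ (by omega)
    have hk := hhdr o ho
    obtain ⟨k1, k2, k3⟩ := h.hdr o ho
    refine ⟨?_, ?_, ?_⟩
    · rw [hk.readLE (UInt64.ofNat (o.base - 32)) 8 (by omega) (by omega) (by omega)]
      exact k1
    · rw [hk.readLE (UInt64.ofNat (o.base - 24)) 8 (by omega) (by omega) (by omega)]
      exact k2
    · rw [hk.readLE (UInt64.ofNat (o.base - 16)) 8 (by omega) (by omega) (by omega)]
      exact k3

/-- A memory that agrees with `mem` on the whole region keeps the heap. -/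
theorem eqOn (h : HeapOK H mem) (he : Mem.EqOn H.base H.limit mem mem') : HeapOK H mem' := by
  have hroom := h.room
  apply h.frame
  · exact he.mono (Nat.le_refl _) (by omega)
  · intro o ho
    have hr := h.obj_range ho
    have hi := h.obj_inside ho
    exact he.mono (by omega) (by omega)

/-- **A store into the bytes of an object** (`[p, p + cap)`: the object and its room to grow) keeps the heap: headers and control
cell are elsewhere. -/
theorem writeLE_obj (h : HeapOK H mem) {o : HObj} (ho : o ∈ H.objs) (a : Word) (k v : Nat) (h1 : o.base ≤ a.toNat)
    (h2 : a.toNat + k ≤ o.base + o.cap) : HeapOK H (mem.writeLE a k v) := by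
  have hr := h.obj_range ho
  have hi := h.obj_inside ho
  have hhi := h.hi
  apply h.frame
  · exact Mem.EqOn.writeLE _ _ mem a k v (by omega) (by omega)
  · intro o' ho'
    have hr' := h.obj_range ho'
    by_cases e : o = o'
    · subst e
      exact Mem.EqOn.writeLE _ _ mem a k v (by omega) (by omega)
    · have hap := h.apart ho ho' e
      exact Mem.EqOn.writeLE _ _ mem a k v (by omega) (by omega)

/-- **A store outside the used part of the region** (the stack, a global, the output …) keeps the heap. -/
theorem writeLE_out (h : HeapOK H mem) (a : Word) (k v : Nat) (hk : a.toNat + k < 2 ^ 64)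
    (hout : a.toNat + k ≤ H.base ∨ H.base + 32 + H.used ≤ a.toNat) : HeapOK H (mem.writeLE a k v) := by
  apply h.frame
  · exact Mem.EqOn.writeLE _ _ mem a k v hk (by omega)
  · intro o ho
    have hr := h.obj_range ho
    exact Mem.EqOn.writeLE _ _ mem a k v hk (by omega)

/-- **A callee's footprint**: every window lies outside the used part of the region, or inside the bytes of one object. -/
theorem sameExcept (h : HeapOK H mem) {ws : List Span} (hs : Mem.SameExcept ws mem mem')
    (hw : ∀ w, w ∈ ws → (w.hi ≤ H.base ∨ H.base + 32 + H.used ≤ w.lo) ∨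
      ∃ o, o ∈ H.objs ∧ o.base ≤ w.lo ∧ w.hi ≤ o.base + o.cap) : HeapOK H mem' := by
  apply h.frame
  · apply hs.eqOn
    intro w hin
    rcases hw w hin with hout | ⟨o, ho, k1, k2⟩
    · omega
    · have hr := h.obj_range ho
      omega
  · intro o' ho'
    have hr' := h.obj_range ho'
    apply hs.eqOn
    intro w hin
    rcases hw w hin with hout | ⟨o, ho, k1, k2⟩
    · omega
    · have hr := h.obj_range ho
      by_cases e : o = o'
      · subst e
        omega
      · have hap := h.apart ho ho' e
        omega

end HeapOK

/-! ### 5. The transitions of the data side -/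

namespace HeapOK
variable {H : Heap} {mem mem' : Mem}

/-- What `H.Fits c` means against the machine's test (`c + 64 > ROOM − used → NULL`, with `ROOM = limit − base − 32`). -/
theorem fits_iff (h : HeapOK H mem) (c : Nat) :
    H.Fits c ↔ c + 64 ≤ H.limit - (H.base + 32) - H.used := by
  have hroom := h.room
  unfold Heap.Fits
  omega

/-- The new object of a fitting request lies inside the region. -/
theorem next_range (h : HeapOK H mem) {c : Nat} (hfit : H.Fits c) :
    H.base + 64 ≤ H.next ∧ H.next % 16 = 0 ∧ H.next + c + 32 ≤ H.limit ∧ 0x200040 ≤ H.next ∧ H.next + c + 32 ≤ 0xC00000 := by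
  have hb := h.base16
  have hu := h.used_aligned
  have hlo := h.lo
  have hhi := h.hi
  unfold Heap.Fits at hfit
  rw [Heap.next_def]
  omega

/-- **An allocation of `n` bytes with capacity `c` succeeded**: the new header and the new value of the control cell are in memory,
the older chunks are as they were. Then the heap with one more live object is in memory. -/
theorem push (h : HeapOK H mem) {n c : Nat} (hfit : H.Fits c) (hnc : r16 n ≤ c) (hc16 : c % 16 = 0)
    (hcell : mem'.readLE (UInt64.ofNat H.base) 8 = H.used + 64 + c)
    (hsize : mem'.readLE (UInt64.ofNat (H.next - 32)) 8 = n)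
    (hstate : mem'.readLE (UInt64.ofNat (H.next - 24)) 8 = HState.magic .live)
    (hcap : mem'.readLE (UInt64.ofNat (H.next - 16)) 8 = c)
    (hold : Mem.EqOn (H.base + 32) (H.base + 32 + H.used) mem mem') : HeapOK (H.push n c) mem' := by
  have hfit' := hfit
  unfold Heap.Fits at hfit'
  have hlo := h.lo
  have hhi := h.hi
  refine ⟨h.base16, h.lo, h.hi, h.offStack, ?_, ?_, ?_, ?_, ?_⟩
  · simp only [Heap.push_base, Heap.push_used, Heap.push_limit]
    omega
  · simp only [Heap.push_base, Heap.push_used, Heap.push_objs]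
    unfold Chain
    refine ⟨H.base + 32 + H.used, h.chain, ?_, ?_⟩
    · exact Heap.next_def H
    · show H.base + 32 + (H.used + 64 + c) = H.next + c + 32
      rw [Heap.next_def]
      omega
  · intro o ho
    simp only [Heap.push_objs] at ho
    rcases List.mem_cons.mp ho with rfl | hin
    · exact ⟨hnc, hc16⟩
    · exact h.capOK o hin
  · exact hcell
  · intro o ho
    simp only [Heap.push_objs] at ho
    rcases List.mem_cons.mp ho with rfl | hin
    · exact ⟨hsize, hstate, hcap⟩
    · have hr := h.obj_range hin
      have hi := h.obj_inside hin
      have e1 : (UInt64.ofNat (o.base - 32)).toNat = o.base - 32 := toNat_ofNat_lt' _ (by omega)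
      have e2 : (UInt64.ofNat (o.base - 24)).toNat = o.base - 24 := toNat_ofNat_lt' _ (by omega)
      have e3 : (UInt64.ofNat (o.base - 16)).toNat = o.base - 16 := toNat_ofNat_lt' _ (by omega)
      obtain ⟨k1, k2, k3⟩ := h.hdr o hin
      refine ⟨?_, ?_, ?_⟩
      · rw [hold.readLE (UInt64.ofNat (o.base - 32)) 8 (by omega) (by omega) (by omega)]
        exact k1
      · rw [hold.readLE (UInt64.ofNat (o.base - 24)) 8 (by omega) (by omega) (by omega)]
        exact k2
      · rw [hold.readLE (UInt64.ofNat (o.base - 16)) 8 (by omega) (by omega) (by omega)]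
        exact k3

/-- **One word of the header of the object at `p` changed** (`k` = 32: the size, 24: the state), everything else of the region is as
it was: the header facts of every object but the changed word carry over. -/
theorem hdr_other (h : HeapOK H mem) {p n c : Nat} {st : HState} (hl : (⟨p, n, c, st⟩ : HObj) ∈ H.objs) (k : Nat)
    (hk : k = 32 ∨ k = 24)
    (hbelow : Mem.EqOn H.base (p - k) mem mem') (habove : Mem.EqOn (p - k + 8) H.limit mem mem')
    {o : HObj} (ho : o ∈ H.objs) :
    (o.base ≠ p ∨ k ≠ 32 → mem'.readLE (UInt64.ofNat (o.base - 32)) 8 = o.size) ∧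
    (o.base ≠ p ∨ k ≠ 24 → mem'.readLE (UInt64.ofNat (o.base - 24)) 8 = o.state.magic) ∧
    mem'.readLE (UInt64.ofNat (o.base - 16)) 8 = o.cap := by
  have hhi := h.hi
  have hrp := h.obj_range hl
  have hip := h.obj_inside hl
  have hr := h.obj_range ho
  have hi := h.obj_inside ho
  obtain ⟨k1, k2, k3⟩ := h.hdr o ho
  have e1 : (UInt64.ofNat (o.base - 32)).toNat = o.base - 32 := toNat_ofNat_lt' _ (by omega)
  have e2 : (UInt64.ofNat (o.base - 24)).toNat = o.base - 24 := toNat_ofNat_lt' _ (by omega)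
  have e3 : (UInt64.ofNat (o.base - 16)).toNat = o.base - 16 := toNat_ofNat_lt' _ (by omega)
  simp only at hrp hip
  by_cases hb : o.base = p
  · refine ⟨?_, ?_, ?_⟩
    · intro hne
      have hk' : k = 24 := by omega
      rw [hbelow.readLE (UInt64.ofNat (o.base - 32)) 8 (by omega) (by omega) (by omega)]
      exact k1
    · intro hne
      have hk' : k = 32 := by omega
      rw [habove.readLE (UInt64.ofNat (o.base - 24)) 8 (by omega) (by omega) (by omega)]
      exact k2
    · rw [habove.readLE (UInt64.ofNat (o.base - 16)) 8 (by omega) (by omega) (by omega)]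
      exact k3
  · have hap := h.apart_of_base_ne ho hl hb
    simp only at hap
    rcases hap with hlow | hhigh
    · refine ⟨fun _ => ?_, fun _ => ?_, ?_⟩
      · rw [hbelow.readLE (UInt64.ofNat (o.base - 32)) 8 (by omega) (by omega) (by omega)]
        exact k1
      · rw [hbelow.readLE (UInt64.ofNat (o.base - 24)) 8 (by omega) (by omega) (by omega)]
        exact k2
      · rw [hbelow.readLE (UInt64.ofNat (o.base - 16)) 8 (by omega) (by omega) (by omega)]
        exact k3
    · refine ⟨fun _ => ?_, fun _ => ?_, ?_⟩
      · rw [habove.readLE (UInt64.ofNat (o.base - 32)) 8 (by omega) (by omega) (by omega)]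
        exact k1
      · rw [habove.readLE (UInt64.ofNat (o.base - 24)) 8 (by omega) (by omega) (by omega)]
        exact k2
      · rw [habove.readLE (UInt64.ofNat (o.base - 16)) 8 (by omega) (by omega) (by omega)]
        exact k3

/-- **`free(p)` of the live object at `p`**: the state word of its header holds the freed mark, everything else of the region is
as it was. Then the heap with that object freed is in memory. -/
theorem release (h : HeapOK H mem) {p n c : Nat} (hl : H.LiveCap p n c)
    (hstate : mem'.readLE (UInt64.ofNat (p - 24)) 8 = HState.magic .freed)
    (hbelow : Mem.EqOn H.base (p - 24) mem mem') (habove : Mem.EqOn (p - 16) H.limit mem mem') :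
    HeapOK (H.release p) mem' := by
  have hlo := h.lo
  have hhi := h.hi
  have hroom := h.room
  have hrp := h.obj_range hl
  have hb : (UInt64.ofNat H.base).toNat = H.base := toNat_ofNat_lt' H.base (by omega)
  simp only at hrp
  have habove' : Mem.EqOn (p - 24 + 8) H.limit mem mem' := by
    have e : p - 24 + 8 = p - 16 := by omega
    rw [e]
    exact habove
  refine ⟨h.base16, h.lo, h.hi, h.offStack, h.room, ?_, ?_, ?_, ?_⟩
  · exact h.chain.map _ (releaseObj_base p) (releaseObj_cap p)
  · intro o ho
    simp only [Heap.release_objs] at ho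
    obtain ⟨o0, ho0, e⟩ := List.mem_map.mp ho
    subst e
    rw [releaseObj_size, releaseObj_cap]
    exact h.capOK o0 ho0
  · simp only [Heap.release_base, Heap.release_used]
    rw [hbelow.readLE (UInt64.ofNat H.base) 8 (by omega) (by omega) (by omega)]
    exact h.cell
  · intro o ho
    simp only [Heap.release_objs] at ho
    obtain ⟨o0, ho0, e⟩ := List.mem_map.mp ho
    obtain ⟨k1, k2, k3⟩ := h.hdr_other hl 24 (Or.inr rfl) hbelow habove' ho0
    by_cases hb0 : o0.base = p
    · rw [releaseObj_of_eq hb0] at e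
      subst e
      simp only
      refine ⟨k1 (Or.inr (by decide)), ?_, k3⟩
      rw [hb0]
      exact hstate
    · rw [releaseObj_of_ne hb0] at e
      subst e
      exact ⟨k1 (Or.inl hb0), k2 (Or.inl hb0), k3⟩

/-- **An in-place `realloc(p, m)` of the live object at `p`**, `r16 m ≤` its capacity: the size word of its header holds `m`,
everything else of the region is as it was. Then the heap with that object resized is in memory. -/
theorem resize (h : HeapOK H mem) {p n c m : Nat} (hl : H.LiveCap p n c) (hm : r16 m ≤ c)
    (hsize : mem'.readLE (UInt64.ofNat (p - 32)) 8 = m)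
    (hbelow : Mem.EqOn H.base (p - 32) mem mem') (habove : Mem.EqOn (p - 24) H.limit mem mem') :
    HeapOK (H.resize p m) mem' := by
  have hlo := h.lo
  have hhi := h.hi
  have hroom := h.room
  have hrp := h.obj_range hl
  have hb : (UInt64.ofNat H.base).toNat = H.base := toNat_ofNat_lt' H.base (by omega)
  simp only at hrp
  have habove' : Mem.EqOn (p - 32 + 8) H.limit mem mem' := by
    have e : p - 32 + 8 = p - 24 := by omega
    rw [e]
    exact habove
  refine ⟨h.base16, h.lo, h.hi, h.offStack, h.room, ?_, ?_, ?_, ?_⟩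
  · exact h.chain.map _ (resizeObj_base p m) (resizeObj_cap p m)
  · intro o ho
    simp only [Heap.resize_objs] at ho
    obtain ⟨o0, ho0, e⟩ := List.mem_map.mp ho
    by_cases hb0 : o0.base = p
    · have e0 := h.base_inj ho0 hl hb0
      rw [resizeObj_of_eq hb0] at e
      subst e
      subst e0
      exact ⟨hm, (h.capOK _ hl).2⟩
    · rw [resizeObj_of_ne hb0] at e
      subst e
      exact h.capOK o0 ho0
  · simp only [Heap.resize_base, Heap.resize_used]
    rw [hbelow.readLE (UInt64.ofNat H.base) 8 (by omega) (by omega) (by omega)]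
    exact h.cell
  · intro o ho
    simp only [Heap.resize_objs] at ho
    obtain ⟨o0, ho0, e⟩ := List.mem_map.mp ho
    obtain ⟨k1, k2, k3⟩ := h.hdr_other hl 32 (Or.inl rfl) hbelow habove' ho0
    by_cases hb0 : o0.base = p
    · rw [resizeObj_of_eq hb0] at e
      subst e
      simp only
      refine ⟨?_, k2 (Or.inr (by decide)), k3⟩
      rw [hb0]
      exact hsize
    · rw [resizeObj_of_ne hb0] at e
      subst e
      exact ⟨k1 (Or.inl hb0), k2 (Or.inl hb0), k3⟩

/-- **The empty heap**: a region whose control cell reads 0. -/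
theorem empty (base limit : Nat) (h16 : base % 16 = 0) (hlo : 0x200000 ≤ base) (hhi : limit ≤ 0xC00000)
    (hoff : limit ≤ 0x700000 ∨ 0x800000 ≤ base) (hroom : base + 32 ≤ limit)
    (hcell : mem.readLE (UInt64.ofNat base) 8 = 0) : HeapOK (Heap.empty base limit) mem := by
  refine ⟨h16, hlo, hhi, hoff, ?_, ?_, ?_, hcell, ?_⟩
  · show base + 32 + 0 ≤ limit
    omega
  · show Chain (base + 32) [] (base + 32 + 0)
    unfold Chain
    rfl
  · intro o ho
    exact absurd ho List.not_mem_nil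
  · intro o ho
    exact absurd ho List.not_mem_nil

end HeapOK

/-! ### 6. The views, and how they change -/

namespace Heap
variable {H : Heap} {p q n m c : Nat}

/-- **An allocation keeps every live object.** -/
theorem Live.push (h : H.Live p n) (m c : Nat) : (H.push m c).Live p n := by
  obtain ⟨c', h⟩ := h
  refine ⟨c', ?_⟩
  unfold LiveCap
  rw [push_objs]
  exact List.mem_cons_of_mem _ h

/-- **An allocation keeps every freed object freed.** -/
theorem Freed.push (h : H.Freed p n) (m c : Nat) : (H.push m c).Freed p n := by
  obtain ⟨c', h⟩ := h
  refine ⟨c', ?_⟩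
  rw [push_objs]
  exact List.mem_cons_of_mem _ h

/-- **The new object of an allocation is live.** -/
theorem liveCap_push (H : Heap) (n c : Nat) : (H.push n c).LiveCap H.next n c := by
  unfold LiveCap
  rw [push_objs]
  exact List.mem_cons_self

/-- **The new object of an allocation is live.** -/
theorem live_push (H : Heap) (n c : Nat) : (H.push n c).Live H.next n := ⟨c, liveCap_push H n c⟩

/-- **`free(q)` keeps every other live object** (with its capacity). -/
theorem LiveCap.release_ne (h : H.LiveCap p n c) (hne : p ≠ q) : (H.release q).LiveCap p n c := by
  unfold LiveCap at h ⊢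
  rw [release_objs]
  refine List.mem_map.mpr ⟨⟨p, n, c, .live⟩, h, ?_⟩
  exact releaseObj_of_ne hne

/-- **`free(q)` keeps every other live object.** -/
theorem Live.release_ne (h : H.Live p n) (hne : p ≠ q) : (H.release q).Live p n := by
  obtain ⟨c, h⟩ := h
  exact ⟨c, h.release_ne hne⟩

/-- **`free` keeps every freed object freed.** -/
theorem Freed.release (h : H.Freed p n) (q : Nat) : (H.release q).Freed p n := by
  obtain ⟨c, h⟩ := h
  refine ⟨c, ?_⟩
  rw [release_objs]
  refine List.mem_map.mpr ⟨⟨p, n, c, .freed⟩, h, ?_⟩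
  unfold releaseObj
  split <;> rfl

/-- **The object `free(p)` was called for is freed.** -/
theorem freed_release (h : H.Live p n) : (H.release p).Freed p n := by
  obtain ⟨c, h⟩ := h
  refine ⟨c, ?_⟩
  unfold LiveCap at h
  rw [release_objs]
  refine List.mem_map.mpr ⟨⟨p, n, c, .live⟩, h, ?_⟩
  exact releaseObj_of_eq rfl

/-- A live object after `free(q)` was live before, and is not the one at `q`. -/
theorem LiveCap.of_release (h : (H.release q).LiveCap p n c) : H.LiveCap p n c ∧ p ≠ q := by
  unfold LiveCap at h
  rw [release_objs] at h
  obtain ⟨o, ho, e⟩ := List.mem_map.mp h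
  by_cases hb : o.base = q
  · rw [releaseObj_of_eq hb] at e
    have hs : HState.freed = HState.live := congrArg HObj.state e
    exact HState.noConfusion hs
  · rw [releaseObj_of_ne hb] at e
    subst e
    exact ⟨ho, hb⟩

/-- A live object after `free(q)` was live before, and is not the one at `q`. -/
theorem Live.of_release (h : (H.release q).Live p n) : H.Live p n ∧ p ≠ q := by
  obtain ⟨c, h⟩ := h
  obtain ⟨h1, h2⟩ := h.of_release
  exact ⟨⟨c, h1⟩, h2⟩

/-- A live object after an allocation is the new one, or was live before. -/
theorem Live.of_push (h : (H.push m c).Live p n) : (p = H.next ∧ n = m) ∨ H.Live p n := by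
  obtain ⟨c', h⟩ := h
  unfold LiveCap at h
  rw [push_objs] at h
  rcases List.mem_cons.mp h with e | hin
  · left
    exact ⟨congrArg HObj.base e, congrArg HObj.size e⟩
  · exact Or.inr ⟨c', hin⟩

/-- **An in-place `realloc(q, m)` keeps every other live object.** -/
theorem LiveCap.resize_ne (h : H.LiveCap p n c) (hne : p ≠ q) (m : Nat) : (H.resize q m).LiveCap p n c := by
  unfold LiveCap at h ⊢
  rw [resize_objs]
  refine List.mem_map.mpr ⟨⟨p, n, c, .live⟩, h, ?_⟩
  exact resizeObj_of_ne hne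

/-- **An in-place `realloc(q, m)` keeps every other live object.** -/
theorem Live.resize_ne (h : H.Live p n) (hne : p ≠ q) (m : Nat) : (H.resize q m).Live p n := by
  obtain ⟨c, h⟩ := h
  exact ⟨c, h.resize_ne hne m⟩

/-- **An in-place `realloc(q, m)` keeps every freed object with another base.** -/
theorem Freed.resize_ne (h : H.Freed p n) (hne : p ≠ q) (m : Nat) : (H.resize q m).Freed p n := by
  obtain ⟨c, h⟩ := h
  refine ⟨c, ?_⟩
  rw [resize_objs]
  refine List.mem_map.mpr ⟨⟨p, n, c, .freed⟩, h, ?_⟩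
  exact resizeObj_of_ne hne

/-- **The object of an in-place `realloc(p, m)` is live, at the same address, with the new size and the old capacity.** -/
theorem liveCap_resize (h : H.LiveCap p n c) (m : Nat) : (H.resize p m).LiveCap p m c := by
  unfold LiveCap at h ⊢
  rw [resize_objs]
  refine List.mem_map.mpr ⟨⟨p, n, c, .live⟩, h, ?_⟩
  exact resizeObj_of_eq rfl

/-- **The object of an in-place `realloc(p, m)` is live with the new size.** -/
theorem live_resize (h : H.Live p n) (m : Nat) : (H.resize p m).Live p m := by
  obtain ⟨c, h⟩ := h
  exact ⟨c, liveCap_resize h m⟩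

/-- A live object after an in-place `realloc(q, m)` is the resized one, or was live before with another base. -/
theorem LiveCap.of_resize (h : (H.resize q m).LiveCap p n c) :
    (p = q ∧ n = m ∧ ∃ n0, H.LiveCap q n0 c) ∨ (H.LiveCap p n c ∧ p ≠ q) := by
  unfold LiveCap at h
  rw [resize_objs] at h
  obtain ⟨o, ho, e⟩ := List.mem_map.mp h
  by_cases hb : o.base = q
  · left
    rw [resizeObj_of_eq hb] at e
    have e1 : o.base = p := congrArg HObj.base e
    have e2 : m = n := congrArg HObj.size e
    have e3 : o.cap = c := congrArg HObj.cap e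
    have e4 : o.state = .live := congrArg HObj.state e
    refine ⟨by omega, e2.symm, o.size, ?_⟩
    unfold LiveCap
    have eo : o = ⟨q, o.size, c, .live⟩ := by
      cases o with
      | mk b s cp st =>
        simp only at hb e3 e4
        rw [hb, e3, e4]
    rw [eo] at ho
    exact ho
  · right
    rw [resizeObj_of_ne hb] at e
    subst e
    exact ⟨ho, hb⟩

/-! The live objects as a list of `Obj`s. -/

/-- What the live list contains. -/
theorem mem_liveObjs {x : Obj} : x ∈ H.liveObjs ↔ ∃ o, o ∈ H.objs ∧ o.state = .live ∧ o.obj = x := by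
  unfold liveObjs
  constructor
  · intro h
    obtain ⟨o, ho, e⟩ := List.mem_map.mp h
    obtain ⟨hin, hst⟩ := List.mem_filter.mp ho
    exact ⟨o, hin, of_decide_eq_true hst, e⟩
  · intro h
    obtain ⟨o, hin, hst, e⟩ := h
    exact List.mem_map.mpr ⟨o, List.mem_filter.mpr ⟨hin, decide_eq_true hst⟩, e⟩

/-- A live object is in the live list. -/
theorem Live.mem_liveObjs (h : H.Live p n) : (⟨p, n, .heap⟩ : Obj) ∈ H.liveObjs := by
  obtain ⟨c, h⟩ := h
  exact Heap.mem_liveObjs.mpr ⟨⟨p, n, c, .live⟩, h, rfl, rfl⟩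

/-- An object of the live list is a live object. -/
theorem live_of_mem_liveObjs {x : Obj} (h : x ∈ H.liveObjs) : H.Live x.base x.size ∧ x.kind = .heap := by
  obtain ⟨o, hin, hst, e⟩ := mem_liveObjs.mp h
  subst e
  have eo : o = ⟨o.base, o.size, o.cap, .live⟩ := by
    cases o with
    | mk b s cp st =>
      simp only at hst
      rw [hst]
  refine ⟨⟨o.cap, ?_⟩, rfl⟩
  unfold LiveCap
  rw [eo] at hin
  exact hin

/-- An object of kind `.heap` with the base and size of a live object IS that object of the live list. -/
theorem mem_liveObjs_of_live {x : Obj} (hl : H.Live x.base x.size) (hk : x.kind = .heap) : x ∈ H.liveObjs := by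
  have := hl.mem_liveObjs
  cases x with
  | mk b s k =>
    simp only at hk this ⊢
    rw [hk]
    exact this

/-- **After an allocation the live list has one more object, in front.** -/
theorem liveObjs_push (H : Heap) (n c : Nat) : (H.push n c).liveObjs = ⟨H.next, n, .heap⟩ :: H.liveObjs := by
  unfold liveObjs
  rw [push_objs, List.filter_cons_of_pos (by simp), List.map_cons]
  rfl

/-- What the live list contains after `free(p)`. -/
theorem mem_liveObjs_release {x : Obj} : x ∈ (H.release p).liveObjs ↔ x ∈ H.liveObjs ∧ x.base ≠ p := by
  constructor
  · intro h
    obtain ⟨hl, hk⟩ := live_of_mem_liveObjs h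
    obtain ⟨hl', hne⟩ := hl.of_release
    exact ⟨mem_liveObjs_of_live hl' hk, hne⟩
  · intro h
    obtain ⟨hin, hne⟩ := h
    obtain ⟨hl, hk⟩ := live_of_mem_liveObjs hin
    exact mem_liveObjs_of_live (hl.release_ne hne) hk

/-- What the live list contains after an in-place `realloc(p, m)`: the resized object, and the live objects with another base. -/
theorem mem_liveObjs_resize {x : Obj} (h : x ∈ (H.resize p m).liveObjs) :
    (x = ⟨p, m, .heap⟩ ∧ ∃ n0, H.Live p n0) ∨ (x ∈ H.liveObjs ∧ x.base ≠ p) := by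
  obtain ⟨hl, hk⟩ := live_of_mem_liveObjs h
  obtain ⟨c, hl⟩ := hl
  rcases hl.of_resize with ⟨e1, e2, n0, h0⟩ | ⟨h1, hne⟩
  · left
    refine ⟨?_, n0, c, h0⟩
    cases x with
    | mk b s k =>
      simp only at e1 e2 hk
      rw [e1, e2, hk]
  · right
    exact ⟨mem_liveObjs_of_live ⟨c, h1⟩ hk, hne⟩

/-- **After `free(p)` the live list is a sublist of what it was.** -/
theorem liveObjs_release_sublist (H : Heap) (p : Nat) : (H.release p).liveObjs.Sublist H.liveObjs := by
  unfold liveObjs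
  rw [release_objs]
  generalize H.objs = l
  induction l with
  | nil => exact List.Sublist.refl _
  | cons o rest ih =>
    simp only [List.map_cons]
    by_cases hb : o.base = p
    · rw [releaseObj_of_eq hb]
      rw [List.filter_cons_of_neg (by simp)]
      by_cases hst : o.state = .live
      · rw [List.filter_cons_of_pos (by simp [hst]), List.map_cons]
        exact List.Sublist.cons _ ih
      · rw [List.filter_cons_of_neg (by simp [hst])]
        exact ih
    · rw [releaseObj_of_ne hb]
      by_cases hst : o.state = .live
      · rw [List.filter_cons_of_pos (by simp [hst]), List.filter_cons_of_pos (by simp [hst]), List.map_cons, List.map_cons]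
        exact List.Sublist.cons_cons _ ih
      · rw [List.filter_cons_of_neg (by simp [hst]), List.filter_cons_of_neg (by simp [hst])]
        exact ih

end Heap

/-- **The live heap objects share no granule** (from the chain: two red zones between two chunks, bases 16-aligned). -/
theorem HeapOK.liveObjs_pairwise {H : Heap} {mem : Mem} (h : HeapOK H mem) : H.liveObjs.Pairwise GranDisj := by
  unfold Heap.liveObjs
  rw [List.pairwise_map]
  refine List.Pairwise.sublist List.filter_sublist ?_
  refine List.Pairwise.imp_of_mem ?_ h.chain.pairwise
  intro o o' ho ho' hlt
  have ha := h.obj_aligned ho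
  have ha' := h.obj_aligned ho'
  have hs' := h.size_le_cap ho'
  unfold GranDisj Obj.gLo Obj.gHi
  simp only [HObj.obj_base, HObj.obj_size]
  omega

/-! ### 8. The shadow side: tightness, and the whole invariant -/

/-- **THE TIGHTNESS CLAUSE**: every granule of the region that no live object owns is poisoned — the control cell, every header,
the room between an object's size and its capacity, every red zone, every freed object, and the part never used. (No check site
needs it: a check is justified by "this address lies inside THIS live object". It is what makes a use after free, a double free
and an overflow REPORTABLE.) -/
def HeapPoisoned (H : Heap) (mem : Mem) : Prop :=
  ∀ g, H.base / 8 ≤ g → g < H.limit / 8 →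
    (∀ p n, H.Live p n → g < p / 8 ∨ (p + n + 7) / 8 ≤ g) → 128 ≤ shadowOf mem g

/-- **THE HEAP'S INVARIANT**: the data side, the shadow layer with the live heap objects in front of the other live objects
`rest`, every one of `rest` outside the region, and the tightness clause. -/
structure HeapInv (H : Heap) (rest : List Obj) (frames : List (Nat × FrameLayout)) (top : Nat) (mem : Mem) : Prop where
  heap : HeapOK H mem
  shadow : ShadowInv (H.liveObjs ++ rest) frames top mem
  restOut : ∀ o, o ∈ rest → o.base + o.size ≤ H.base ∨ H.limit ≤ o.base
  poisoned : HeapPoisoned H mem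

/-- `arena_unpoison` writes shadow bytes only: the data space reads the same. -/
theorem eqOn_data_unpoisonMem (mem : Mem) (a n : Nat) (h8 : a % 8 = 0) (hhi : a + n ≤ 0xC00000) :
    Mem.EqOn 0 0xC00000 mem (unpoisonMem mem a n) := by
  apply (unpoisonMem_sameExcept mem a n h8 hhi).eqOn
  intro w hw
  have e : w = shadowSpan a (a + n) := List.mem_singleton.mp hw
  subst e
  unfold shadowSpan
  simp only
  omega

/-- `arena_poison` writes shadow bytes only. -/
theorem eqOn_data_poisonMem (mem : Mem) (a n : Nat) (h8 : a % 8 = 0) (hhi : a + (n + 7) / 8 * 8 ≤ 0xC00000) :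
    Mem.EqOn 0 0xC00000 mem (poisonMem mem a n) := by
  apply (poisonMem_sameExcept mem a n h8 hhi).eqOn
  intro w hw
  have e : w = shadowSpan a (a + n) := List.mem_singleton.mp hw
  subst e
  unfold shadowSpan
  simp only
  omega

/-- Stores outside the shadow keep the tightness clause. -/
theorem HeapPoisoned.untouched {H : Heap} {mem mem' : Mem} (h : HeapPoisoned H mem) (hhi : H.limit ≤ 0xC00000)
    (hun : ShadowUntouched mem mem') : HeapPoisoned H mem' := by
  intro g hg1 hg2 hfree
  rw [shadowOf_eqOn hun g (by omega)]
  exact h g hg1 hg2 hfree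

namespace HeapInv
variable {H : Heap} {rest : List Obj} {frames : List (Nat × FrameLayout)} {top top' : Nat} {mem mem' : Mem}

/-- A heap object shares no granule with an object outside the region. -/
theorem granDisj_out (h : HeapOK H mem) {o : HObj} (ho : o ∈ H.objs) {x : Obj}
    (hx : x.base + x.size ≤ H.base ∨ H.limit ≤ x.base) : GranDisj o.obj x := by
  have hr := h.obj_range ho
  have hi := h.obj_inside ho
  have hb := h.base16
  have ha := h.obj_aligned ho
  have hsc := h.size_le_cap ho
  unfold GranDisj Obj.gLo Obj.gHi
  simp only [HObj.obj_base, HObj.obj_size]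
  omega

/-- The live heap objects and the other live objects, together, share no granule. -/
theorem pairwise_all (h : HeapOK H mem) (hrest : rest.Pairwise GranDisj)
    (hout : ∀ o, o ∈ rest → o.base + o.size ≤ H.base ∨ H.limit ≤ o.base) : (H.liveObjs ++ rest).Pairwise GranDisj := by
  refine List.pairwise_append.mpr ⟨h.liveObjs_pairwise, hrest, ?_⟩
  intro x hx y hy
  obtain ⟨o, ho, _, e⟩ := Heap.mem_liveObjs.mp hx
  rw [← e]
  exact granDisj_out h ho (hout y hy)

/-- The other live objects share no granule. -/
theorem rest_pairwise (h : HeapInv H rest frames top mem) : rest.Pairwise GranDisj :=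
  (List.pairwise_append.mp (List.pairwise_append.mp h.shadow.shadow.disjoint).2.1).2.1

/-- A stack object lies outside the heap's region. -/
theorem stackObj_out (h : HeapInv H rest frames top mem) {x : Obj} (hx : x ∈ stackObjs frames) :
    x.base + x.size ≤ H.base ∨ H.limit ≤ x.base := by
  obtain ⟨bF, hbF, g1, g2⟩ := ShadowInv.stackObj_gran h.shadow.stack hx
  obtain ⟨hF, a8, atop, ahi, _⟩ := h.shadow.stack.active bF hbF
  have hlo := h.shadow.stack.lo
  have hoff := h.heap.offStack
  have hs8 := hF.1
  unfold Obj.gLo at g1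
  unfold Obj.gHi at g2
  omega

/-- **THE FRAME LEMMA of the whole invariant**: no shadow byte written, control cell and headers unchanged. -/
theorem frame (h : HeapInv H rest frames top mem) (hun : ShadowUntouched mem mem')
    (hcell : Mem.EqOn H.base (H.base + 8) mem mem')
    (hhdr : ∀ o, o ∈ H.objs → Mem.EqOn (o.base - 32) (o.base - 8) mem mem') : HeapInv H rest frames top mem' :=
  ⟨h.heap.frame hcell hhdr, h.shadow.untouched hun, h.restOut, h.poisoned.untouched h.heap.hi hun⟩

/-- **A memory that differs from `mem` outside the region and outside the shadow only** (a callee that wrote its stack frame, a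
global, the output) keeps the invariant. -/
theorem eqOn (h : HeapInv H rest frames top mem) (hun : ShadowUntouched mem mem')
    (hsame : Mem.EqOn H.base H.limit mem mem') : HeapInv H rest frames top mem' :=
  ⟨h.heap.eqOn hsame, h.shadow.untouched hun, h.restOut, h.poisoned.untouched h.heap.hi hun⟩

/-- **A callee's footprint** (`memset`, `memcpy` into a live object; any function that writes its stack frame and windows outside
the heap): no shadow byte written; every window lies outside the used part of the region, or inside the bytes of one object. -/
theorem sameExcept (h : HeapInv H rest frames top mem) (hun : ShadowUntouched mem mem') {ws : List Span}
    (hs : Mem.SameExcept ws mem mem')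
    (hw : ∀ w, w ∈ ws → (w.hi ≤ H.base ∨ H.base + 32 + H.used ≤ w.lo) ∨
      ∃ o, o ∈ H.objs ∧ o.base ≤ w.lo ∧ w.hi ≤ o.base + o.cap) : HeapInv H rest frames top mem' :=
  ⟨h.heap.sameExcept hs hw, h.shadow.untouched hun, h.restOut, h.poisoned.untouched h.heap.hi hun⟩

/-- **A store into a LIVE object keeps the invariant** (the one frame lemma a client's walk needs: its checked stores go into
live objects). -/
theorem writeLE_live (h : HeapInv H rest frames top mem) {p n : Nat} (hl : H.Live p n) (a : Word) (k v : Nat)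
    (h1 : p ≤ a.toNat) (h2 : a.toNat + k ≤ p + n) : HeapInv H rest frames top (mem.writeLE a k v) := by
  obtain ⟨c, hl⟩ := hl
  have hi := h.heap.obj_inside hl
  have hle := h.heap.size_le_cap hl
  simp only at hi hle
  refine ⟨h.heap.writeLE_obj hl a k v h1 (by simp only; omega), ?_, h.restOut, ?_⟩
  · exact h.shadow.writeLE a k v (by omega) (by omega)
  · exact h.poisoned.untouched h.heap.hi (eqOn_shadow_writeLE mem a k v (by omega) (by omega))

/-- **A store outside the used part of the region and outside the shadow** (the stack, a global, the output) keeps the invariant. -/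
theorem writeLE_out (h : HeapInv H rest frames top mem) (a : Word) (k v : Nat) (hk : a.toNat + k < 2 ^ 64)
    (hout : a.toNat + k ≤ H.base ∨ H.base + 32 + H.used ≤ a.toNat)
    (hsh : a.toNat + k ≤ 0xC00000 ∨ 0xE00000 ≤ a.toNat) : HeapInv H rest frames top (mem.writeLE a k v) :=
  ⟨h.heap.writeLE_out a k v hk hout, h.shadow.writeLE a k v hk hsh, h.restOut,
    h.poisoned.untouched h.heap.hi (eqOn_shadow_writeLE mem a k v hk hsh)⟩

/-- The stack pointer goes down. -/
theorem lower (h : HeapInv H rest frames top mem) (ht : top' ≤ top) (h8 : top' % 8 = 0) (hlo : 0x700000 ≤ top') :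
    HeapInv H rest frames top' mem :=
  ⟨h.heap, h.shadow.lower ht h8 hlo, h.restOut, h.poisoned⟩

/-- The stack pointer goes up over unprotected stack. -/
theorem raise (h : HeapInv H rest frames top mem) (ht : top ≤ top') (h8 : top' % 8 = 0) (hhi : top' ≤ 0x800000)
    (hfr : ∀ bF, bF ∈ frames → top' ≤ bF.1) : HeapInv H rest frames top' mem :=
  ⟨h.heap, h.shadow.raise ht h8 hhi hfr, h.restOut, h.poisoned⟩

/-- **A check site inside a live heap object** (1-, 2-, 4-, 8-byte checks). -/
theorem accSmall (h : HeapInv H rest frames top mem) {p n : Nat} (hl : H.Live p n) {a k : Nat} (h1 : p ≤ a)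
    (h2 : a + k ≤ p + n) (hk : 1 ≤ k) : AccessibleSmall mem a k :=
  Obj.accSmall_of_obj (o := ⟨p, n, .heap⟩) (h.shadow.obj_other (List.mem_append_left _ hl.mem_liveObjs)) h1 h2 hk

/-- **A check site inside a live heap object** (16- and N-byte checks). -/
theorem acc (h : HeapInv H rest frames top mem) {p n : Nat} (hl : H.Live p n) {a k : Nat} (h1 : p ≤ a)
    (h2 : a + k ≤ p + n) (hk : 1 ≤ k) : Accessible mem a k :=
  Obj.acc_of_obj (o := ⟨p, n, .heap⟩) (h.shadow.obj_other (List.mem_append_left _ hl.mem_liveObjs)) h1 h2 hk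

/-- **No byte of a freed object, of a header, of a red zone passes a check**: a granule of the region that no live object owns
is refused by the runtime's byte test. -/
theorem not_byteOK (h : HeapInv H rest frames top mem) (a : Nat) (h1 : H.base ≤ a) (h2 : a < H.limit / 8 * 8)
    (hfree : ∀ p n, H.Live p n → a / 8 < p / 8 ∨ (p + n + 7) / 8 ≤ a / 8) : ¬ ByteOK mem a := by
  intro hb
  have := h.poisoned (a / 8) (by omega) (by omega) hfree
  unfold ByteOK ByteOKv shadowByte at hb
  omega

/-- **THE TRANSITION OF AN ALLOCATION, success** (`malloc(n)`: `c = r16 n`; a moving `realloc`: `c = 2 * r16 n` or `r16 n`). `mem'`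
is the memory after the allocator's own stores (the new header, the control cell; and whatever it pushed on the stack): no shadow
byte written, the older chunks as they were. The final memory is what `arena_unpoison(H.next, n)` makes of it. -/
theorem malloc (h : HeapInv H rest frames top mem) {n c : Nat} (hfit : H.Fits c) (hnc : r16 n ≤ c) (hc16 : c % 16 = 0)
    (hun : ShadowUntouched mem mem')
    (hcell : mem'.readLE (UInt64.ofNat H.base) 8 = H.used + 64 + c)
    (hsize : mem'.readLE (UInt64.ofNat (H.next - 32)) 8 = n)
    (hstate : mem'.readLE (UInt64.ofNat (H.next - 24)) 8 = HState.magic .live)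
    (hcap : mem'.readLE (UInt64.ofNat (H.next - 16)) 8 = c)
    (hold : Mem.EqOn (H.base + 32) (H.base + 32 + H.used) mem mem') :
    HeapInv (H.push n c) rest frames top (unpoisonMem mem' H.next n) := by
  obtain ⟨r1, r2, r3, r4, r5⟩ := h.heap.next_range hfit
  have hhi := h.heap.hi
  have hlo := h.heap.lo
  have hle := le_r16 n
  have hdata := eqOn_data_unpoisonMem mem' H.next n (by omega) (by omega)
  have hpush := h.heap.push hfit hnc hc16 hcell hsize hstate hcap hold
  have hnewobj : (⟨H.next, n, c, .live⟩ : HObj) ∈ (H.push n c).objs := Heap.liveCap_push H n c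
  refine ⟨?_, ?_, h.restOut, ?_⟩
  · -- the data side: `arena_unpoison` wrote shadow bytes only
    apply hpush.eqOn
    exact hdata.mono (Nat.zero_le _) (by simp only [Heap.push_limit]; omega)
  · -- the shadow layer: one more object
    rw [Heap.liveObjs_push]
    have hoff : OffStack (⟨H.next, n, .heap⟩ : Obj) := hpush.obj_offStack hnewobj
    refine (h.shadow.untouched hun).unpoison ⟨H.next, n, .heap⟩ (by show H.next % 8 = 0; omega) (by show 0x100000 ≤ H.next; omega)
      (by show H.next + n ≤ 0xC00000; omega) hoff ?_
    intro x hx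
    rcases List.mem_append.mp hx with hheap | hr
    · obtain ⟨o, ho, _, e⟩ := Heap.mem_liveObjs.mp hheap
      have hab := h.heap.next_above ho
      have ha := h.heap.obj_aligned ho
      have hsc := h.heap.size_le_cap ho
      rw [← e]
      unfold GranDisj Obj.gLo Obj.gHi
      simp only [HObj.obj_base, HObj.obj_size]
      omega
    · exact granDisj_out hpush hnewobj (h.restOut x hr)
  · -- tightness: only granules of the new object changed
    intro g hg1 hg2 hfree
    simp only [Heap.push_base, Heap.push_limit] at hg1 hg2
    have hnew := hfree H.next n (Heap.live_push H n c)
    rw [shadowOf_unpoisonMem_out mem' H.next n g (by omega) (by omega) (by omega) (by omega)]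
    rw [shadowOf_eqOn hun g (by omega)]
    apply h.poisoned g hg1 hg2
    intro p k hl
    exact hfree p k (hl.push n c)

/-- **THE TRANSITION OF `free(p)`** for the live object `(p, n)`. `mem'` is the memory after the allocator's own stores (the state
word of the header; stack): no shadow byte written, the rest of the region as it was. The final memory is what
`arena_poison(p, n)` makes of it. -/
theorem free (h : HeapInv H rest frames top mem) {p n : Nat} (hl : H.Live p n) (hun : ShadowUntouched mem mem')
    (hstate : mem'.readLE (UInt64.ofNat (p - 24)) 8 = HState.magic .freed)
    (hbelow : Mem.EqOn H.base (p - 24) mem mem') (habove : Mem.EqOn (p - 16) H.limit mem mem') :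
    HeapInv (H.release p) rest frames top (poisonMem mem' p n) := by
  obtain ⟨c, hlc⟩ := hl
  have hl : H.Live p n := ⟨c, hlc⟩
  have hr := h.heap.obj_range hlc
  have hi := h.heap.obj_inside hlc
  have ha := h.heap.obj_aligned hlc
  have hsc := h.heap.size_le_cap hlc
  have hhi := h.heap.hi
  have hlo := h.heap.lo
  have hoffs := h.heap.obj_offStack hlc
  unfold OffStack at hoffs
  simp only [HObj.obj_base, HObj.obj_size] at hr hi ha hoffs hsc
  have hrange : p + (n + 7) / 8 * 8 ≤ 0xC00000 := by omega
  have hdata := eqOn_data_poisonMem mem' p n (by omega) hrange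
  have hrel := h.heap.release hlc hstate hbelow habove
  refine ⟨?_, ?_, h.restOut, ?_⟩
  · apply hrel.eqOn
    exact hdata.mono (Nat.zero_le _) (by simp only [Heap.release_limit]; omega)
  · -- the shadow layer: the objects that survive have no granule in the poisoned range
    have hstack : p + (n + 7) / 8 * 8 ≤ 0x700000 ∨ 0x800000 ≤ p := by
      have hoff := h.heap.offStack
      omega
    refine (h.shadow.untouched hun).poison p n (by omega) (by omega) hrange hstack
      ((Heap.liveObjs_release_sublist H p).append (List.Sublist.refl rest)) ?_
    intro x hx
    rcases List.mem_append.mp hx with hheap | hrst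
    · obtain ⟨hin, hne⟩ := Heap.mem_liveObjs_release.mp hheap
      obtain ⟨o, ho, _, e⟩ := Heap.mem_liveObjs.mp hin
      rw [← e] at hne ⊢
      have hap := h.heap.apart_of_base_ne ho hlc hne
      have hax := h.heap.obj_aligned ho
      have hsx := h.heap.size_le_cap ho
      simp only at hap
      unfold Obj.gLo Obj.gHi
      simp only [HObj.obj_base, HObj.obj_size]
      omega
    · have hout := h.restOut x hrst
      have hb := h.heap.base16
      unfold Obj.gLo Obj.gHi
      omega
  · -- tightness: the freed object's granules now hold FAH, the others are as before
    intro g hg1 hg2 hfree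
    simp only [Heap.release_base, Heap.release_limit] at hg1 hg2
    by_cases hin : p / 8 ≤ g ∧ g < (p + n + 7) / 8
    · rw [shadowOf_poisonMem_in mem' p n g (by omega) hrange hin.1 hin.2]
      omega
    · rw [shadowOf_poisonMem_out mem' p n g (by omega) hrange (by omega) (by omega)]
      rw [shadowOf_eqOn hun g (by omega)]
      apply h.poisoned g hg1 hg2
      intro q k hlq
      by_cases hq : q = p
      · subst hq
        have := h.heap.live_size hl hlq
        subst this
        omega
      · exact hfree q k (hlq.release_ne hq)

/-- **THE TRANSITION OF AN IN-PLACE `realloc(p, m)`** for the live object `(p, n)` of capacity `c ≥ r16 m`. `mem'` is the memory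
after the allocator's own store (the size word of the header; stack): no shadow byte written, the rest of the region as it was.
`arena_poison(p, n)` makes `poisonMem mem' p n` of it; `mem2` is the memory at the call of `arena_unpoison(p, m)`: the code pushes a
return address in between, so `mem2` differs from the poisoned memory outside the region and outside the shadow. The final memory
is `unpoisonMem mem2 p m`: exactly `[p, p + m)` is accessible. -/
theorem resize' (h : HeapInv H rest frames top mem) {p n c m : Nat} {mem2 : Mem} (hlc : H.LiveCap p n c) (hm : r16 m ≤ c)
    (hun : ShadowUntouched mem mem')
    (hsize : mem'.readLE (UInt64.ofNat (p - 32)) 8 = m)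
    (hbelow : Mem.EqOn H.base (p - 32) mem mem') (habove : Mem.EqOn (p - 24) H.limit mem mem')
    (hun2 : ShadowUntouched (poisonMem mem' p n) mem2) (hsame2 : Mem.EqOn H.base H.limit (poisonMem mem' p n) mem2) :
    HeapInv (H.resize p m) rest frames top (unpoisonMem mem2 p m) := by
  have hl : H.Live p n := ⟨c, hlc⟩
  have hr := h.heap.obj_range hlc
  have hi := h.heap.obj_inside hlc
  have ha := h.heap.obj_aligned hlc
  have hsc := h.heap.size_le_cap hlc
  have hhi := h.heap.hi
  have hlo := h.heap.lo
  have hlem := le_r16 m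
  have hoffs := h.heap.obj_offStack hlc
  have hoff := h.heap.offStack
  unfold OffStack at hoffs
  simp only [HObj.obj_base, HObj.obj_size] at hr hi ha hoffs hsc
  have hrange : p + (n + 7) / 8 * 8 ≤ 0xC00000 := by omega
  have hdata1 := eqOn_data_poisonMem mem' p n (by omega) hrange
  have hdata2 := eqOn_data_unpoisonMem mem2 p m (by omega) (by omega)
  have hres := h.heap.resize hlc hm hsize hbelow habove
  have hnew : (⟨p, m, c, .live⟩ : HObj) ∈ (H.resize p m).objs := Heap.liveCap_resize hlc m
  refine ⟨?_, ?_, h.restOut, ?_⟩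
  · apply hres.eqOn
    simp only [Heap.resize_base, Heap.resize_limit]
    exact ((hdata1.mono (Nat.zero_le _) (by omega)).trans hsame2).trans (hdata2.mono (Nat.zero_le _) (by omega))
  · -- the shadow layer: poison the old extent, unpoison the new one, re-order
    have hstack : p + (n + 7) / 8 * 8 ≤ 0x700000 ∨ 0x800000 ≤ p := by omega
    -- the live objects other than the one at `p`
    have hsub1 : ((H.liveObjs.filter (fun x => decide (x.base ≠ p))) ++ rest).Sublist (H.liveObjs ++ rest) :=
      List.filter_sublist.append (List.Sublist.refl rest)
    have hfar : ∀ x, x ∈ (H.liveObjs.filter (fun x => decide (x.base ≠ p))) ++ rest →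
        x.gHi ≤ p / 8 ∨ (p + c) / 8 ≤ x.gLo := by
      intro x hx
      rcases List.mem_append.mp hx with hheap | hrst
      · obtain ⟨hin, hne⟩ := List.mem_filter.mp hheap
        have hne' : x.base ≠ p := of_decide_eq_true hne
        obtain ⟨o, ho, _, e⟩ := Heap.mem_liveObjs.mp hin
        rw [← e] at hne' ⊢
        have hap := h.heap.apart_of_base_ne ho hlc hne'
        have hax := h.heap.obj_aligned ho
        have hsx := h.heap.size_le_cap ho
        simp only at hap
        unfold Obj.gLo Obj.gHi
        simp only [HObj.obj_base, HObj.obj_size]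
        omega
      · have hout := h.restOut x hrst
        have hb := h.heap.base16
        unfold Obj.gLo Obj.gHi
        omega
    have hc16 := (h.heap.capOK _ hlc).2
    simp only at hc16
    have s1 := (h.shadow.untouched hun).poison p n (by omega) (by omega) hrange hstack hsub1 (by
      intro x hx
      have := hfar x hx
      omega)
    have s2 := (s1.untouched hun2).unpoison ⟨p, m, .heap⟩ (by show p % 8 = 0; omega) (by show 0x100000 ≤ p; omega)
      (by show p + m ≤ 0xC00000; omega) (by unfold OffStack; simp only; omega) (by
        intro x hx
        have := hfar x hx
        unfold GranDisj Obj.gLo Obj.gHi at *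
        simp only
        omega)
    refine s2.subset ?_ (pairwise_all hres h.rest_pairwise h.restOut)
    intro x hx
    rcases List.mem_append.mp hx with hheap | hrst
    · rcases Heap.mem_liveObjs_resize hheap with ⟨e, _⟩ | ⟨hin, hne⟩
      · rw [e]
        exact List.mem_cons_self
      · apply List.mem_cons_of_mem
        apply List.mem_append_left
        exact List.mem_filter.mpr ⟨hin, decide_eq_true hne⟩
    · exact List.mem_cons_of_mem _ (List.mem_append_right _ hrst)
  · -- tightness: within the old extent exactly the granules of `[p, p + m)` are accessible, the others hold FAH
    intro g hg1 hg2 hfree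
    simp only [Heap.resize_base, Heap.resize_limit] at hg1 hg2
    have hnewfree := hfree p m (Heap.live_resize hl m)
    rw [shadowOf_unpoisonMem_out mem2 p m g (by omega) (by omega) (by omega) (by omega)]
    rw [shadowOf_eqOn hun2 g (by omega)]
    by_cases hin : p / 8 ≤ g ∧ g < (p + n + 7) / 8
    · rw [shadowOf_poisonMem_in mem' p n g (by omega) hrange hin.1 hin.2]
      omega
    · rw [shadowOf_poisonMem_out mem' p n g (by omega) hrange (by omega) (by omega)]
      rw [shadowOf_eqOn hun g (by omega)]
      apply h.poisoned g hg1 hg2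
      intro q k hlq
      by_cases hq : q = p
      · subst hq
        have := h.heap.live_size hl hlq
        subst this
        omega
      · exact hfree q k (hlq.resize_ne hq m)

/-- The same when nothing happens between the two runtime calls. -/
theorem resize (h : HeapInv H rest frames top mem) {p n c m : Nat} (hlc : H.LiveCap p n c) (hm : r16 m ≤ c)
    (hun : ShadowUntouched mem mem')
    (hsize : mem'.readLE (UInt64.ofNat (p - 32)) 8 = m)
    (hbelow : Mem.EqOn H.base (p - 32) mem mem') (habove : Mem.EqOn (p - 24) H.limit mem mem') :
    HeapInv (H.resize p m) rest frames top (unpoisonMem (poisonMem mem' p n) p m) :=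
  h.resize' hlc hm hun hsize hbelow habove (Mem.EqOn.refl _ _ _) (Mem.EqOn.refl _ _ _)

/-- **THE START**: the empty heap on a region whose control cell reads 0 and whose granules are all poisoned (the start file:
the region is zero, its shadow FFH), under the shadow layer of the other live objects. -/
theorem empty {base limit : Nat} (hsh : ShadowInv rest frames top mem) (h16 : base % 16 = 0) (hlo : 0x200000 ≤ base)
    (hhi : limit ≤ 0xC00000) (hoff : limit ≤ 0x700000 ∨ 0x800000 ≤ base) (hroom : base + 32 ≤ limit)
    (hcell : mem.readLE (UInt64.ofNat base) 8 = 0)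
    (hout : ∀ o, o ∈ rest → o.base + o.size ≤ base ∨ limit ≤ o.base)
    (hpois : ∀ g, base / 8 ≤ g → g < limit / 8 → 128 ≤ shadowOf mem g) :
    HeapInv (Heap.empty base limit) rest frames top mem :=
  ⟨HeapOK.empty base limit h16 hlo hhi hoff hroom hcell, hsh, hout, fun g hg1 hg2 _ => hpois g hg1 hg2⟩

end HeapInv

end Asan
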